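-- pv_equiv track=rewrite | github.com/yoshihikohayashi/wic_llm_coling2025 | greedy_ensemble.py | select_adding_predictor
-- ===== SOURCE A (Python) =====
-- def classify_instances(golds, preds):
--     T_OK = []; T_NG = []; F_OK = []; F_NG = []
--     for i, (g, p) in enumerate(zip(golds, preds)):
--         if g=='T':
--             if g==p: T_OK.append(i)
--             else: T_NG.append(i)
--         else:
--             if g==p: F_OK.append(i)
--             else: F_NG.append(i)
--     return set(T_OK), set(T_NG), set(F_OK), set(F_NG)
--
-- def select_adding_predictor(golds, meta_predictor_preds, cand_predictors, cand_predictors_preds_list, selected_predictors):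
--     meta_T_ok, meta_T_ng, meta_F_ok, meta_F_ng = classify_instances(golds, meta_predictor_preds)
--     selected_predictor = None
--     max_score_sofar = -9999
--     #
--     for cand_predictor, cand_predictor_preds in zip(cand_predictors, cand_predictors_preds_list):
--         if cand_predictor in selected_predictors: continue
--         T_ok, T_ng, F_ok, F_ng = classify_instances(golds, cand_predictor_preds)
--         ok_instances = T_ok.union(F_ok)
--         ng_instances = T_ng.union(F_ng)
--         only_cand_ok = ok_instances.difference(meta_T_ok.union(meta_F_ok))
--         only_meta_ok = (meta_T_ok.union(meta_F_ok)).difference(ok_instances)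
--         meta_ok = meta_T_ok.union(meta_F_ok)
--         both_ok = ok_instances.intersection(meta_ok)
--         #
--         score = (len(meta_ok) + len(only_cand_ok)) * len(both_ok) # 理想的なケースも最悪?のケースもOKを最大化したい
--         #
--         if score > max_score_sofar:
--             selected_predictor = cand_predictor
--             selected_predictor_preds = cand_predictor_preds
--             max_score_sofar = score
--     if not selected_predictor: return None, None
--     return selected_predictor, selected_predictor_preds
-- ===== SOURCE B (Python) =====
-- def select_adding_predictor(golds, meta_predictor_preds, cand_predictors, cand_predictors_preds_list, selected_predictors):
--     # meta correctness as a boolean mask, computed once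
--     mok = [g == p for g, p in zip(golds, meta_predictor_preds)]
--     mcount = sum(mok)
--     best = None
--     best_score = -9999
--     for name, preds in zip(cand_predictors, cand_predictors_preds_list):
--         if name in selected_predictors:
--             continue
--         inter = 0   # instances both meta and candidate get right
--         extra = 0   # instances only the candidate gets right
--         for i, (g, p) in enumerate(zip(golds, preds)):
--             if g == p:
--                 if i < len(mok) and mok[i]:
--                     inter += 1
--                 else:
--                     extra += 1
--         score = (mcount + extra) * inter
--         if score > best_score:
--             best = (name, preds)
--             best_score = score
--     if not best or not best[0]:
--         return None, None
--     return best
-- ===== Notes on version B (the rewrite author's own statement) =====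
-- stated objective: faster
-- what changed: Replaces per-candidate classify_instances index-set building and set union/difference/intersection cardinalities by one precomputed boolean meta-correctness mask and a single pass per candidate maintaining two integer counters (both-ok, only-cand-ok), keeping the same first-max selection and final falsy-name check.
import Mathlib
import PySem

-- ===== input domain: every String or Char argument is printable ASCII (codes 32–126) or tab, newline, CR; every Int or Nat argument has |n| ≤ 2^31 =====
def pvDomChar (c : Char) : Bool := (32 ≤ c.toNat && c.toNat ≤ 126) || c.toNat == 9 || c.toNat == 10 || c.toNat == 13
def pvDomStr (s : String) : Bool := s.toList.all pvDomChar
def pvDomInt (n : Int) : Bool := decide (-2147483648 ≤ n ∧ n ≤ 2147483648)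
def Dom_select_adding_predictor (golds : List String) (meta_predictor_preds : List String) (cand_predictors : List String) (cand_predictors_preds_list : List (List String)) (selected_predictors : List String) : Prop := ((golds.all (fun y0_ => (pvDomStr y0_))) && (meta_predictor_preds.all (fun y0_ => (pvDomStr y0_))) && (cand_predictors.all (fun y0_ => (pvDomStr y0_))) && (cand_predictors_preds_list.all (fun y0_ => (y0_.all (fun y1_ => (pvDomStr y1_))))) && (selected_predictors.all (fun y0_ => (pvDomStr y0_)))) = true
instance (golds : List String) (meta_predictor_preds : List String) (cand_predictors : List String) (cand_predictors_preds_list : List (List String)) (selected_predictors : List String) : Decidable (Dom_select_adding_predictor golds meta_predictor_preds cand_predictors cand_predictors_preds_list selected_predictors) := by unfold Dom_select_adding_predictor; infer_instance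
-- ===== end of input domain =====

-- ===== PORT A =====
-- B replaces A's per-candidate index-set constructions (classify_instances + union/diff/inter)
-- by one precomputed boolean meta-mask and two integer counters per candidate (faster by a constant factor: no set objects built).
def classifyAux : List (String × String) → Nat → List Nat × List Nat × List Nat × List Nat
  | [], _ => ([], [], [], [])
  | (g, p) :: rest, i =>
    let r := classifyAux rest (i + 1)
    if g == "T" then
      if g == p then (i :: r.1, r.2.1, r.2.2.1, r.2.2.2)
      else (r.1, i :: r.2.1, r.2.2.1, r.2.2.2)
    else
      if g == p then (r.1, r.2.1, i :: r.2.2.1, r.2.2.2)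
      else (r.1, r.2.1, r.2.2.1, i :: r.2.2.2)

def classify_instances (golds preds : List String) :
    PySem.Set Nat × PySem.Set Nat × PySem.Set Nat × PySem.Set Nat :=
  let r := classifyAux (golds.zip preds) 0
  (PySem.Set.ofList r.1, PySem.Set.ofList r.2.1, PySem.Set.ofList r.2.2.1, PySem.Set.ofList r.2.2.2)

def select_adding_predictor (golds : List String) (meta_predictor_preds : List String) (cand_predictors : List String) (cand_predictors_preds_list : List (List String)) (selected_predictors : List String) : Option String × Option (List String) :=
  let m := classify_instances golds meta_predictor_preds
  let st := (cand_predictors.zip cand_predictors_preds_list).foldl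
    (fun (st : Option String × Option (List String) × Int) cp =>
      if selected_predictors.contains cp.1 then st
      else
        let c := classify_instances golds cp.2
        let ok_instances := PySem.Set.union c.1 c.2.2.1
        let _ng_instances := PySem.Set.union c.2.1 c.2.2.2
        let only_cand_ok := PySem.Set.diff ok_instances (PySem.Set.union m.1 m.2.2.1)
        let _only_meta_ok := PySem.Set.diff (PySem.Set.union m.1 m.2.2.1) ok_instances
        let meta_ok := PySem.Set.union m.1 m.2.2.1
        let both_ok := PySem.Set.inter ok_instances meta_ok
        let score : Int := (PySem.Set.len meta_ok + PySem.Set.len only_cand_ok) * PySem.Set.len both_ok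
        if score > st.2.2 then (some cp.1, some cp.2, score) else st)
    ((none : Option String), (none : Option (List String)), (-9999 : Int))
  match st.1 with
  | none => (none, none)
  | some s => if s == "" then (none, none) else (some s, st.2.1)

-- ===== PORT B =====
def select_adding_predictor_alt (golds : List String) (meta_predictor_preds : List String) (cand_predictors : List String) (cand_predictors_preds_list : List (List String)) (selected_predictors : List String) : Option String × Option (List String) :=
  let mok := (golds.zip meta_predictor_preds).map (fun x => x.1 == x.2)
  let mcount : Int := (mok.map (fun b => if b then (1 : Int) else 0)).sum
  let r := (cand_predictors.zip cand_predictors_preds_list).foldl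
    (fun (st : Option (String × List String) × Int) np =>
      if selected_predictors.contains np.1 then st
      else
        let ie := ((golds.zip np.2).zipIdx).foldl
          (fun (c : Int × Int) y =>
            if y.1.1 == y.1.2 then
              if decide (y.2 < mok.length) && mok.getD y.2 false then (c.1 + 1, c.2)
              else (c.1, c.2 + 1)
            else c) ((0 : Int), (0 : Int))
        let score := (mcount + ie.2) * ie.1
        if score > st.2 then (some (np.1, np.2), score) else st)
    ((none : Option (String × List String)), (-9999 : Int))
  match r.1 with
  | none => (none, none)
  | some np => if np.1 == "" then (none, none) else (some np.1, some np.2)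

-- ===== PRECONDITION & SPEC =====
def Spec_select_adding_predictor (golds : List String) (meta_predictor_preds : List String) (cand_predictors : List String) (cand_predictors_preds_list : List (List String)) (selected_predictors : List String) (out : Option String × Option (List String)) : Prop := out = select_adding_predictor_alt golds meta_predictor_preds cand_predictors cand_predictors_preds_list selected_predictors
instance (golds : List String) (meta_predictor_preds : List String) (cand_predictors : List String) (cand_predictors_preds_list : List (List String)) (selected_predictors : List String) (out : Option String × Option (List String)) : Decidable (Spec_select_adding_predictor golds meta_predictor_preds cand_predictors cand_predictors_preds_list selected_predictors out) := by unfold Spec_select_adding_predictor; infer_instance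

-- ===== CLAIM (what is proved, stated in full; the proofs are below) =====
def Claim_equal_select_adding_predictor : Prop := ∀ (golds : List String) (meta_predictor_preds : List String) (cand_predictors : List String) (cand_predictors_preds_list : List (List String)) (selected_predictors : List String), Dom_select_adding_predictor golds meta_predictor_preds cand_predictors cand_predictors_preds_list selected_predictors → Spec_select_adding_predictor golds meta_predictor_preds cand_predictors cand_predictors_preds_list selected_predictors (select_adding_predictor golds meta_predictor_preds cand_predictors cand_predictors_preds_list selected_predictors)

-- ===== LEMMAS AND PROOFS =====

-- index list of positions of l (standing at offset s) whose pair satisfies q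
def pvComp (q : String × String → Bool) (l : List (String × String)) (s : Nat) : List Nat :=
  ((l.zipIdx s).filter (fun y => q y.1)).map Prod.snd

-- "position j of L exists and satisfies q"
def pvPred (q : String × String → Bool) (L : List (String × String)) (j : Nat) : Bool :=
  (L[j]?.map q).getD false

-- "gold at j equals prediction at j" (within the zipped length)
def pvOkAt (L : List (String × String)) (j : Nat) : Bool :=
  pvPred (fun x => x.1 == x.2) L j

lemma classifyAux_eq (l : List (String × String)) (s : Nat) :
    classifyAux l s =
      (pvComp (fun x => x.1 == "T" && x.1 == x.2) l s,
       pvComp (fun x => x.1 == "T" && !(x.1 == x.2)) l s,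
       pvComp (fun x => !(x.1 == "T") && x.1 == x.2) l s,
       pvComp (fun x => !(x.1 == "T") && !(x.1 == x.2)) l s) := by
  induction l generalizing s with
  | nil => simp [classifyAux, pvComp]
  | cons x l ih =>
    obtain ⟨g, p⟩ := x
    by_cases hT : (g == "T") = true <;> by_cases hE : (g == p) = true <;>
      simp [classifyAux, pvComp, List.zipIdx_cons, hT, hE, ih]

lemma mem_pvComp (q : String × String → Bool) (l : List (String × String)) (j : Nat) :
    j ∈ pvComp q l 0 ↔ pvPred q l j = true := by
  simp only [pvComp, List.mem_map, List.mem_filter]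
  constructor
  · rintro ⟨⟨x, i⟩, ⟨hmem, hq⟩, rfl⟩
    have := List.mem_zipIdx_iff_getElem?.mp hmem
    simp [pvPred, this, hq]
  · intro h
    cases hL : l[j]? with
    | none => simp [pvPred, hL] at h
    | some x =>
      refine ⟨(x, j), ⟨List.mem_zipIdx_iff_getElem?.mpr (by simpa using hL), ?_⟩, rfl⟩
      simpa [pvPred, hL] using h

lemma pvPred_lt (q : String × String → Bool) (L : List (String × String)) (j : Nat)
    (h : pvPred q L j = true) : j < L.length := by
  cases hL : L[j]? with
  | none => simp [pvPred, hL] at h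
  | some x => exact (List.getElem?_eq_some_iff.mp hL).1

lemma length_eq_countP_range (s : List Nat) (n : Nat) (q : Nat → Bool)
    (hnd : s.Nodup) (hmem : ∀ j, j ∈ s ↔ q j = true) (hlt : ∀ j, q j = true → j < n) :
    s.length = (List.range n).countP q := by
  rw [List.countP_eq_length_filter]
  refine List.Perm.length_eq ?_
  refine (List.perm_ext_iff_of_nodup hnd (List.nodup_range.filter q)).mpr ?_
  intro j
  simp only [List.mem_filter, List.mem_range, hmem]
  exact ⟨fun h => ⟨hlt j h, h⟩, fun h => h.2⟩

lemma countP_range_getElem {α : Type} (L : List α) (f : α → Bool) :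
    (List.range L.length).countP (fun j => (L[j]?.map f).getD false) = L.countP f := by
  induction L using List.reverseRecOn with
  | nil => simp
  | append_singleton L x ih =>
    rw [List.length_append, List.length_singleton, List.range_succ, List.countP_append,
        List.countP_append]
    have hcongr : (List.range L.length).countP (fun j => ((L ++ [x])[j]?.map f).getD false)
        = (List.range L.length).countP (fun j => (L[j]?.map f).getD false) := by
      refine List.countP_congr ?_
      intro j hj
      rw [List.getElem?_append_left (List.mem_range.mp hj)]
    rw [hcongr, ih]
    simp

lemma foldl_counts (r : Nat → Bool) (l : List ((String × String) × Nat)) (a b : Int) :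
    l.foldl (fun (c : Int × Int) y =>
        if y.1.1 == y.1.2 then
          if r y.2 then (c.1 + 1, c.2) else (c.1, c.2 + 1)
        else c) (a, b)
      = (a + (l.countP (fun y => y.1.1 == y.1.2 && r y.2) : Int),
         b + (l.countP (fun y => y.1.1 == y.1.2 && !r y.2) : Int)) := by
  induction l generalizing a b with
  | nil => simp
  | cons y l ih =>
    rw [List.foldl_cons]
    by_cases hE : (y.1.1 == y.1.2) = true
    · by_cases hr : r y.2 = true
      · rw [if_pos hE, if_pos hr, ih]
        simp [hE, hr]
        ring
      · rw [if_pos hE, if_neg hr, ih]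
        simp [hE, hr]
        ring
    · rw [if_neg hE, ih]
      simp [hE]

lemma countP_zipIdx (C : List (String × String)) (r : Nat → Bool) :
    (C.zipIdx.countP (fun y => y.1.1 == y.1.2 && r y.2))
      = (List.range C.length).countP (fun j => pvOkAt C j && r j) := by
  have h1 : C.zipIdx.countP (fun y => y.1.1 == y.1.2 && r y.2)
      = C.zipIdx.countP (fun y => pvOkAt C y.2 && r y.2) := by
    refine List.countP_congr ?_
    intro y hy
    have := List.mem_zipIdx_iff_getElem?.mp hy
    simp [pvOkAt, pvPred, this]
  rw [h1]
  have h2 : C.zipIdx.countP (fun y => pvOkAt C y.2 && r y.2)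
      = ((C.zipIdx.map Prod.snd).countP (fun j => pvOkAt C j && r j)) := by
    rw [List.countP_map]; rfl
  rw [h2, List.zipIdx_map_snd, ← List.range_eq_range']

-- per-candidate equality: A's set-cardinality score = B's two-counter score
lemma bcond_eq (Lm : List (String × String)) (j : Nat) :
    (decide (j < ((Lm.map (fun x => x.1 == x.2)).length)) && (Lm.map (fun x => x.1 == x.2)).getD j false)
      = pvOkAt Lm j := by
  rw [List.getD_eq_getElem?_getD, List.getElem?_map, List.length_map]
  cases hL : Lm[j]? with
  | none =>
    simp [pvOkAt, pvPred, hL]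
  | some x =>
    obtain ⟨hlt, hx⟩ := List.getElem?_eq_some_iff.mp hL
    simp [pvOkAt, pvPred, hlt, hx]

lemma mem_okSet (L : List (String × String)) (j : Nat) :
    j ∈ PySem.Set.union
          (PySem.Set.ofList (pvComp (fun x => x.1 == "T" && x.1 == x.2) L 0))
          (PySem.Set.ofList (pvComp (fun x => !(x.1 == "T") && x.1 == x.2) L 0))
      ↔ pvOkAt L j = true := by
  rw [PySem.Set.mem_union, PySem.Set.mem_ofList, PySem.Set.mem_ofList,
      mem_pvComp, mem_pvComp]
  cases hL : L[j]? with
  | none => simp [pvPred, pvOkAt, hL]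
  | some x =>
    simp only [pvPred, pvOkAt, hL, Option.map_some, Option.getD_some]
    cases hT : (x.1 == "T") <;> simp_all

lemma okSet_nodup (L : List (String × String)) :
    (PySem.Set.union
        (PySem.Set.ofList (pvComp (fun x => x.1 == "T" && x.1 == x.2) L 0))
        (PySem.Set.ofList (pvComp (fun x => !(x.1 == "T") && x.1 == x.2) L 0))).Nodup :=
  PySem.Set.nodup_union _ _ (PySem.Set.nodup_ofList _)

lemma pvOkAt_lt (L : List (String × String)) (j : Nat) (h : pvOkAt L j = true) :
    j < L.length := pvPred_lt _ L j h

lemma okSet_len (L : List (String × String)) :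
    (PySem.Set.union
        (PySem.Set.ofList (pvComp (fun x => x.1 == "T" && x.1 == x.2) L 0))
        (PySem.Set.ofList (pvComp (fun x => !(x.1 == "T") && x.1 == x.2) L 0))).length
      = (List.range L.length).countP (pvOkAt L) :=
  length_eq_countP_range _ _ _ (okSet_nodup L) (mem_okSet L) (pvOkAt_lt L)

lemma score_eq (golds metap cpreds : List String) :
    (let m := classify_instances golds metap
     let c := classify_instances golds cpreds
     let ok_instances := PySem.Set.union c.1 c.2.2.1
     let only_cand_ok := PySem.Set.diff ok_instances (PySem.Set.union m.1 m.2.2.1)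
     let meta_ok := PySem.Set.union m.1 m.2.2.1
     let both_ok := PySem.Set.inter ok_instances meta_ok
     (PySem.Set.len meta_ok + PySem.Set.len only_cand_ok) * PySem.Set.len both_ok)
    = (let mok := (golds.zip metap).map (fun x => x.1 == x.2)
       let mcount : Int := (mok.map (fun b => if b then (1 : Int) else 0)).sum
       let ie := ((golds.zip cpreds).zipIdx).foldl
          (fun (c : Int × Int) y =>
            if y.1.1 == y.1.2 then
              if decide (y.2 < mok.length) && mok.getD y.2 false then (c.1 + 1, c.2)
              else (c.1, c.2 + 1)
            else c) ((0 : Int), (0 : Int))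
       (mcount + ie.2) * ie.1) := by
  set Lm := golds.zip metap with hLm
  set Lc := golds.zip cpreds with hLc
  simp only [classify_instances, classifyAux_eq]
  -- name the two "ok" sets
  set Sm := PySem.Set.union
      (PySem.Set.ofList (pvComp (fun x => x.1 == "T" && x.1 == x.2) Lm 0))
      (PySem.Set.ofList (pvComp (fun x => !(x.1 == "T") && x.1 == x.2) Lm 0)) with hSm
  set Sc := PySem.Set.union
      (PySem.Set.ofList (pvComp (fun x => x.1 == "T" && x.1 == x.2) Lc 0))
      (PySem.Set.ofList (pvComp (fun x => !(x.1 == "T") && x.1 == x.2) Lc 0)) with hSc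
  -- A-side cardinalities
  have hmeta : Sm.length = (List.range Lm.length).countP (pvOkAt Lm) := okSet_len Lm
  have honly : (PySem.Set.diff Sc Sm).length
      = (List.range Lc.length).countP (fun j => pvOkAt Lc j && !pvOkAt Lm j) := by
    refine length_eq_countP_range _ _ _ (PySem.Set.nodup_diff _ _ (okSet_nodup Lc)) ?_ ?_
    · intro j
      rw [PySem.Set.mem_diff, hSc, hSm, mem_okSet, mem_okSet]
      cases h1 : pvOkAt Lc j <;> cases h2 : pvOkAt Lm j <;> simp_all
    · intro j hj
      simp only [Bool.and_eq_true] at hj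
      exact pvOkAt_lt Lc j hj.1
  have hboth : (PySem.Set.inter Sc Sm).length
      = (List.range Lc.length).countP (fun j => pvOkAt Lc j && pvOkAt Lm j) := by
    refine length_eq_countP_range _ _ _ (PySem.Set.nodup_inter _ _ (okSet_nodup Lc)) ?_ ?_
    · intro j
      rw [PySem.Set.mem_inter, hSc, hSm, mem_okSet, mem_okSet]
      cases h1 : pvOkAt Lc j <;> cases h2 : pvOkAt Lm j <;> simp_all
    · intro j hj
      simp only [Bool.and_eq_true] at hj
      exact pvOkAt_lt Lc j hj.1
  -- B-side counters
  have hmcount : ((Lm.map (fun x => x.1 == x.2)).map (fun b => if b then (1 : Int) else 0)).sum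
      = ((List.range Lm.length).countP (pvOkAt Lm) : Int) := by
    rw [PySem.List.sum_map_ite_one_zero, List.countP_map]
    congr 1
    have hcomp : ((fun b => b) ∘ fun (x : String × String) => x.1 == x.2)
        = (fun (x : String × String) => x.1 == x.2) := rfl
    rw [hcomp, ← countP_range_getElem Lm (fun x => x.1 == x.2)]
    rfl
  have hfun : (fun (c : Int × Int) (y : (String × String) × Nat) =>
        if y.1.1 == y.1.2 then
          if decide (y.2 < ((Lm.map (fun x => x.1 == x.2)).length))
              && (Lm.map (fun x => x.1 == x.2)).getD y.2 false then (c.1 + 1, c.2)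
          else (c.1, c.2 + 1)
        else c)
      = (fun (c : Int × Int) (y : (String × String) × Nat) =>
        if y.1.1 == y.1.2 then
          if pvOkAt Lm y.2 then (c.1 + 1, c.2) else (c.1, c.2 + 1)
        else c) := by
    funext c y
    rw [bcond_eq]
  have hie : (Lc.zipIdx).foldl
      (fun (c : Int × Int) y =>
        if y.1.1 == y.1.2 then
          if decide (y.2 < ((Lm.map (fun x => x.1 == x.2)).length))
              && (Lm.map (fun x => x.1 == x.2)).getD y.2 false then (c.1 + 1, c.2)
          else (c.1, c.2 + 1)
        else c) ((0 : Int), (0 : Int))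
      = (((List.range Lc.length).countP (fun j => pvOkAt Lc j && pvOkAt Lm j) : Int),
         ((List.range Lc.length).countP (fun j => pvOkAt Lc j && !pvOkAt Lm j) : Int)) := by
    rw [hfun, foldl_counts (pvOkAt Lm) Lc.zipIdx 0 0]
    rw [countP_zipIdx Lc (pvOkAt Lm)]
    have : (Lc.zipIdx.countP fun y => y.1.1 == y.1.2 && !pvOkAt Lm y.2)
        = (Lc.zipIdx.countP fun y => y.1.1 == y.1.2 && (fun j => !pvOkAt Lm j) y.2) := rfl
    rw [this, countP_zipIdx Lc (fun j => !pvOkAt Lm j)]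
    simp
  simp only [PySem.Set.len, hmeta, honly, hboth, hmcount, hie]

-- relating the two loop states
def pvPhi (st : Option (String × List String) × Int) :
    Option String × Option (List String) × Int :=
  (st.1.map Prod.fst, st.1.map Prod.snd, st.2)

lemma loop_eq (golds meta_predictor_preds selected_predictors : List String)
    (l : List (String × List String)) (st : Option (String × List String) × Int) :
    l.foldl
      (fun (st : Option String × Option (List String) × Int) cp =>
      (if selected_predictors.contains cp.1 then st
      else if (PySem.Set.len (PySem.Set.union (classify_instances golds meta_predictor_preds).1 (classify_instances golds meta_predictor_preds).2.2.1) + PySem.Set.len (PySem.Set.diff (PySem.Set.union (classify_instances golds cp.2).1 (classify_instances golds cp.2).2.2.1) (PySem.Set.union (classify_instances golds meta_predictor_preds).1 (classify_instances golds meta_predictor_preds).2.2.1))) * PySem.Set.len (PySem.Set.inter (PySem.Set.union (classify_instances golds cp.2).1 (classify_instances golds cp.2).2.2.1) (PySem.Set.union (classify_instances golds meta_predictor_preds).1 (classify_instances golds meta_predictor_preds).2.2.1)) > st.2.2 then (some cp.1, some cp.2, (PySem.Set.len (PySem.Set.union (classify_instances golds meta_predictor_preds).1 (classify_instances golds meta_predictor_preds).2.2.1)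 + PySem.Set.len (PySem.Set.diff (PySem.Set.union (classify_instances golds cp.2).1 (classify_instances golds cp.2).2.2.1) (PySem.Set.union (classify_instances golds meta_predictor_preds).1 (classify_instances golds meta_predictor_preds).2.2.1))) * PySem.Set.len (PySem.Set.inter (PySem.Set.union (classify_instances golds cp.2).1 (classify_instances golds cp.2).2.2.1) (PySem.Set.union (classify_instances golds meta_predictor_preds).1 (classify_instances golds meta_predictor_preds).2.2.1))) else st))
      (pvPhi st)
    = pvPhi (l.foldl
      (fun (st : Option (String × List String) × Int) cp =>
      (if selected_predictors.contains cp.1 then st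
      else if (((((golds.zip meta_predictor_preds).map (fun x => x.1 == x.2)).map (fun b => if b then (1 : Int) else 0)).sum) + (((golds.zip cp.2).zipIdx).foldl (fun (c : Int × Int) y => if y.1.1 == y.1.2 then (if decide (y.2 < ((golds.zip meta_predictor_preds).map (fun x => x.1 == x.2)).length) && ((golds.zip meta_predictor_preds).map (fun x => x.1 == x.2)).getD y.2 false then (c.1 + 1, c.2) else (c.1, c.2 + 1)) else c) ((0 : Int), (0 : Int))).2) * (((golds.zip cp.2).zipIdx).foldl (fun (c : Int × Int) y => if y.1.1 == y.1.2 then (if decide (y.2 < ((golds.zip meta_predictor_preds).map (fun x => x.1 == x.2)).length) && ((golds.zip meta_predictor_preds).map (fun x => x.1 == x.2)).getD y.2 false then (c.1 + 1, c.2) else (c.1, c.2 + 1)) else c) ((0 : Int), (0 : Int))).1 > st.2 then (some (cp.1, cp.2), (((((golds.zip meta_predictor_preds).map (fun x => x.1 == x.2)).map (fun b => if b then (1 : Int) else 0)).sum) + (((golds.zip cp.2).zipIdx).foldl (fun (c : Int × Int) y => if y.1.1 == y.1.2 then (if decide (y.2 < ((golds.zip meta_predictor_preds).map (fun x => x.1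 == x.2)).length) && ((golds.zip meta_predictor_preds).map (fun x => x.1 == x.2)).getD y.2 false then (c.1 + 1, c.2) else (c.1, c.2 + 1)) else c) ((0 : Int), (0 : Int))).2) * (((golds.zip cp.2).zipIdx).foldl (fun (c : Int × Int) y => if y.1.1 == y.1.2 then (if decide (y.2 < ((golds.zip meta_predictor_preds).map (fun x => x.1 == x.2)).length) && ((golds.zip meta_predictor_preds).map (fun x => x.1 == x.2)).getD y.2 false then (c.1 + 1, c.2) else (c.1, c.2 + 1)) else c) ((0 : Int), (0 : Int))).1) else st))
      st) := by
  induction l generalizing st with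
  | nil => rfl
  | cons cp l ih =>
    rw [List.foldl_cons, List.foldl_cons]
    have hstep :
        (if selected_predictors.contains cp.1 then (pvPhi st)
      else if (PySem.Set.len (PySem.Set.union (classify_instances golds meta_predictor_preds).1 (classify_instances golds meta_predictor_preds).2.2.1) + PySem.Set.len (PySem.Set.diff (PySem.Set.union (classify_instances golds cp.2).1 (classify_instances golds cp.2).2.2.1) (PySem.Set.union (classify_instances golds meta_predictor_preds).1 (classify_instances golds meta_predictor_preds).2.2.1))) * PySem.Set.len (PySem.Set.inter (PySem.Set.union (classify_instances golds cp.2).1 (classify_instances golds cp.2).2.2.1) (PySem.Set.union (classify_instances golds meta_predictor_preds).1 (classify_instances golds meta_predictor_preds).2.2.1)) > (pvPhi st).2.2 then (some cp.1, some cp.2, (PySem.Set.len (PySem.Set.union (classify_instances golds meta_predictor_preds).1 (classify_instances golds meta_predictor_preds).2.2.1) + PySem.Set.len (PySem.Set.diff (PySem.Set.union (classify_instances golds cp.2).1 (classify_instances golds cp.2).2.2.1) (PySem.Set.union (classify_instances golds meta_predictor_preds).1 (classify_instances golds meta_predictor_preds).2.2.1))) * PySem.Set.len (PySem.Set.inter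 (PySem.Set.union (classify_instances golds cp.2).1 (classify_instances golds cp.2).2.2.1) (PySem.Set.union (classify_instances golds meta_predictor_preds).1 (classify_instances golds meta_predictor_preds).2.2.1))) else (pvPhi st))
        = pvPhi (if selected_predictors.contains cp.1 then st
      else if (((((golds.zip meta_predictor_preds).map (fun x => x.1 == x.2)).map (fun b => if b then (1 : Int) else 0)).sum) + (((golds.zip cp.2).zipIdx).foldl (fun (c : Int × Int) y => if y.1.1 == y.1.2 then (if decide (y.2 < ((golds.zip meta_predictor_preds).map (fun x => x.1 == x.2)).length) && ((golds.zip meta_predictor_preds).map (fun x => x.1 == x.2)).getD y.2 false then (c.1 + 1, c.2) else (c.1, c.2 + 1)) else c) ((0 : Int), (0 : Int))).2) * (((golds.zip cp.2).zipIdx).foldl (fun (c : Int × Int) y => if y.1.1 == y.1.2 then (if decide (y.2 < ((golds.zip meta_predictor_preds).map (fun x => x.1 == x.2)).length) && ((golds.zip meta_predictor_preds).map (fun x => x.1 == x.2)).getD y.2 false then (c.1 + 1, c.2) else (c.1, c.2 + 1)) else c) ((0 : Int), (0 : Int))).1 > st.2 then (some (cp.1, cp.2), (((((golds.zip meta_predictor_preds).map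 (fun x => x.1 == x.2)).map (fun b => if b then (1 : Int) else 0)).sum) + (((golds.zip cp.2).zipIdx).foldl (fun (c : Int × Int) y => if y.1.1 == y.1.2 then (if decide (y.2 < ((golds.zip meta_predictor_preds).map (fun x => x.1 == x.2)).length) && ((golds.zip meta_predictor_preds).map (fun x => x.1 == x.2)).getD y.2 false then (c.1 + 1, c.2) else (c.1, c.2 + 1)) else c) ((0 : Int), (0 : Int))).2) * (((golds.zip cp.2).zipIdx).foldl (fun (c : Int × Int) y => if y.1.1 == y.1.2 then (if decide (y.2 < ((golds.zip meta_predictor_preds).map (fun x => x.1 == x.2)).length) && ((golds.zip meta_predictor_preds).map (fun x => x.1 == x.2)).getD y.2 false then (c.1 + 1, c.2) else (c.1, c.2 + 1)) else c) ((0 : Int), (0 : Int))).1) else st) := by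
      by_cases hskip : selected_predictors.contains cp.1 = true
      · simp only [if_pos hskip]
      · simp only [if_neg hskip, pvPhi]
        have hs := score_eq golds meta_predictor_preds cp.2
        simp only [] at hs
        rw [hs]
        split_ifs with h1 <;> rfl
    rw [hstep]
    exact ih _

theorem select_adding_predictor_spec : Claim_equal_select_adding_predictor := by
  intro golds meta_predictor_preds cand_predictors cand_predictors_preds_list selected_predictors _
  unfold Spec_select_adding_predictor select_adding_predictor select_adding_predictor_alt
  show (match ((cand_predictors.zip cand_predictors_preds_list).foldl
      (fun (st : Option String × Option (List String) × Int) cp =>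
      (if selected_predictors.contains cp.1 then st
      else if (PySem.Set.len (PySem.Set.union (classify_instances golds meta_predictor_preds).1 (classify_instances golds meta_predictor_preds).2.2.1) + PySem.Set.len (PySem.Set.diff (PySem.Set.union (classify_instances golds cp.2).1 (classify_instances golds cp.2).2.2.1) (PySem.Set.union (classify_instances golds meta_predictor_preds).1 (classify_instances golds meta_predictor_preds).2.2.1))) * PySem.Set.len (PySem.Set.inter (PySem.Set.union (classify_instances golds cp.2).1 (classify_instances golds cp.2).2.2.1) (PySem.Set.union (classify_instances golds meta_predictor_preds).1 (classify_instances golds meta_predictor_preds).2.2.1)) > st.2.2 then (some cp.1, some cp.2, (PySem.Set.len (PySem.Set.union (classify_instances golds meta_predictor_preds).1 (classify_instances golds meta_predictor_preds).2.2.1) + PySem.Set.len (PySem.Set.diff (PySem.Set.union (classify_instances golds cp.2).1 (classify_instances golds cp.2).2.2.1) (PySem.Set.union (classify_instances golds meta_predictor_preds).1 (classify_instances golds meta_predictor_preds).2.2.1))) * PySem.Set.len (PySem.Set.inter (PySem.Set.union (classify_instances golds cp.2).1 (classify_instances golds cp.2).2.2.1) (PySem.Set.union (classify_instances golds meta_predictor_preds).1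 (classify_instances golds meta_predictor_preds).2.2.1))) else st))
      (pvPhi ((none : Option (String × List String)), (-9999 : Int)))).1 with
    | none => ((none : Option String), (none : Option (List String)))
    | some s => if s == "" then (none, none)
        else (some s, ((cand_predictors.zip cand_predictors_preds_list).foldl
          (fun (st : Option String × Option (List String) × Int) cp =>
      (if selected_predictors.contains cp.1 then st
      else if (PySem.Set.len (PySem.Set.union (classify_instances golds meta_predictor_preds).1 (classify_instances golds meta_predictor_preds).2.2.1) + PySem.Set.len (PySem.Set.diff (PySem.Set.union (classify_instances golds cp.2).1 (classify_instances golds cp.2).2.2.1) (PySem.Set.union (classify_instances golds meta_predictor_preds).1 (classify_instances golds meta_predictor_preds).2.2.1))) * PySem.Set.len (PySem.Set.inter (PySem.Set.union (classify_instances golds cp.2).1 (classify_instances golds cp.2).2.2.1) (PySem.Set.union (classify_instances golds meta_predictor_preds).1 (classify_instances golds meta_predictor_preds).2.2.1)) > st.2.2 then (some cp.1, some cp.2, (PySem.Set.len (PySem.Set.union (classify_instances golds meta_predictor_preds).1 (classify_instances golds meta_predictor_preds).2.2.1) + PySem.Set.len (PySem.Set.diff (PySem.Set.union (classify_instances golds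 cp.2).1 (classify_instances golds cp.2).2.2.1) (PySem.Set.union (classify_instances golds meta_predictor_preds).1 (classify_instances golds meta_predictor_preds).2.2.1))) * PySem.Set.len (PySem.Set.inter (PySem.Set.union (classify_instances golds cp.2).1 (classify_instances golds cp.2).2.2.1) (PySem.Set.union (classify_instances golds meta_predictor_preds).1 (classify_instances golds meta_predictor_preds).2.2.1))) else st))
          (pvPhi ((none : Option (String × List String)), (-9999 : Int)))).2.1))
    = (match ((cand_predictors.zip cand_predictors_preds_list).foldl
      (fun (st : Option (String × List String) × Int) cp =>
      (if selected_predictors.contains cp.1 then st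
      else if (((((golds.zip meta_predictor_preds).map (fun x => x.1 == x.2)).map (fun b => if b then (1 : Int) else 0)).sum) + (((golds.zip cp.2).zipIdx).foldl (fun (c : Int × Int) y => if y.1.1 == y.1.2 then (if decide (y.2 < ((golds.zip meta_predictor_preds).map (fun x => x.1 == x.2)).length) && ((golds.zip meta_predictor_preds).map (fun x => x.1 == x.2)).getD y.2 false then (c.1 + 1, c.2) else (c.1, c.2 + 1)) else c) ((0 : Int), (0 : Int))).2) * (((golds.zip cp.2).zipIdx).foldl (fun (c : Int × Int) y => if y.1.1 == y.1.2 then (if decide (y.2 < ((golds.zip meta_predictor_preds).map (fun x => x.1 == x.2)).length) && ((golds.zip meta_predictor_preds).map (fun x => x.1 == x.2)).getD y.2 false then (c.1 + 1, c.2) else (c.1, c.2 + 1)) else c) ((0 : Int), (0 : Int))).1 > st.2 then (some (cp.1, cp.2), (((((golds.zip meta_predictor_preds).map (fun x => x.1 == x.2)).map (fun b => if b then (1 : Int) else 0)).sum) + (((golds.zip cp.2).zipIdx).foldl (fun (c : Int × Int) y => if y.1.1 == y.1.2 then (if decide (y.2 < ((golds.zip meta_predictor_preds).map (fun x => x.1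 == x.2)).length) && ((golds.zip meta_predictor_preds).map (fun x => x.1 == x.2)).getD y.2 false then (c.1 + 1, c.2) else (c.1, c.2 + 1)) else c) ((0 : Int), (0 : Int))).2) * (((golds.zip cp.2).zipIdx).foldl (fun (c : Int × Int) y => if y.1.1 == y.1.2 then (if decide (y.2 < ((golds.zip meta_predictor_preds).map (fun x => x.1 == x.2)).length) && ((golds.zip meta_predictor_preds).map (fun x => x.1 == x.2)).getD y.2 false then (c.1 + 1, c.2) else (c.1, c.2 + 1)) else c) ((0 : Int), (0 : Int))).1) else st))
      ((none : Option (String × List String)), (-9999 : Int))).1 with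
    | none => ((none : Option String), (none : Option (List String)))
    | some np => if np.1 == "" then (none, none) else (some np.1, some np.2))
  rw [loop_eq golds meta_predictor_preds selected_predictors
      (cand_predictors.zip cand_predictors_preds_list)
      ((none : Option (String × List String)), (-9999 : Int))]
  generalize ((cand_predictors.zip cand_predictors_preds_list).foldl
      (fun (st : Option (String × List String) × Int) cp =>
      (if selected_predictors.contains cp.1 then st
      else if (((((golds.zip meta_predictor_preds).map (fun x => x.1 == x.2)).map (fun b => if b then (1 : Int) else 0)).sum) + (((golds.zip cp.2).zipIdx).foldl (fun (c : Int × Int) y => if y.1.1 == y.1.2 then (if decide (y.2 < ((golds.zip meta_predictor_preds).map (fun x => x.1 == x.2)).length) && ((golds.zip meta_predictor_preds).map (fun x => x.1 == x.2)).getD y.2 false then (c.1 + 1, c.2) else (c.1, c.2 + 1)) else c) ((0 : Int), (0 : Int))).2) * (((golds.zip cp.2).zipIdx).foldl (fun (c : Int × Int) y => if y.1.1 == y.1.2 then (if decide (y.2 < ((golds.zip meta_predictor_preds).map (fun x => x.1 == x.2)).length) && ((golds.zip meta_predictor_preds).map (fun x => x.1 == x.2)).getD y.2 false then (c.1 + 1,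 c.2) else (c.1, c.2 + 1)) else c) ((0 : Int), (0 : Int))).1 > st.2 then (some (cp.1, cp.2), (((((golds.zip meta_predictor_preds).map (fun x => x.1 == x.2)).map (fun b => if b then (1 : Int) else 0)).sum) + (((golds.zip cp.2).zipIdx).foldl (fun (c : Int × Int) y => if y.1.1 == y.1.2 then (if decide (y.2 < ((golds.zip meta_predictor_preds).map (fun x => x.1 == x.2)).length) && ((golds.zip meta_predictor_preds).map (fun x => x.1 == x.2)).getD y.2 false then (c.1 + 1, c.2) else (c.1, c.2 + 1)) else c) ((0 : Int), (0 : Int))).2) * (((golds.zip cp.2).zipIdx).foldl (fun (c : Int × Int) y => if y.1.1 == y.1.2 then (if decide (y.2 < ((golds.zip meta_predictor_preds).map (fun x => x.1 == x.2)).length) && ((golds.zip meta_predictor_preds).map (fun x => x.1 == x.2)).getD y.2 false then (c.1 + 1, c.2) else (c.1, c.2 + 1)) else c) ((0 : Int), (0 : Int))).1) else st))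
      ((none : Option (String × List String)), (-9999 : Int))) = r
  obtain ⟨b, mx⟩ := r
  cases b with
  | none => rfl
  | some np => cases hnp : np.1 == "" <;> simp [pvPhi, hnp]
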